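-- pv_equiv track=rewrite | github.com/singhamninder/PC-PTF | utils.py | wettodry
-- ===== SOURCE A (Python) =====
-- def wettodry(vwc):
--     vwc = [0 if i < 0 else i for i in vwc]
--     w2d = [vwc[0]]
--     for idx in range(1, len(vwc)):
--         if vwc[idx] < w2d[idx-1]:
--             w2d.append(vwc[idx])
--         else:
--             w2d.append(w2d[idx-1])
--     return w2d
-- ===== SOURCE B (Python) =====
-- def wettodry(vwc):
--     v = [0 if i < 0 else i for i in vwc]
--     # stage 1: run-length encode the answer as (value, count) records
--     runs = []
--     m = v[0]
--     cnt = 0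
--     for x in v:
--         if x < m:
--             runs.append((m, cnt))
--             m = x
--             cnt = 1
--         else:
--             cnt += 1
--     runs.append((m, cnt))
--     # stage 2: expand the run-length encoding
--     out = []
--     for val, c in runs:
--         out += [val] * c
--     return out
-- ===== Notes on version B (the rewrite author's own statement) =====
-- stated objective: alternative
-- what changed: B builds a run-length encoding of the answer (records of strict new minima with their run counts) in one scan and then expands the runs, instead of A's per-index loop appending an element re-read from w2d[idx-1] each step.
import Mathlib
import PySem

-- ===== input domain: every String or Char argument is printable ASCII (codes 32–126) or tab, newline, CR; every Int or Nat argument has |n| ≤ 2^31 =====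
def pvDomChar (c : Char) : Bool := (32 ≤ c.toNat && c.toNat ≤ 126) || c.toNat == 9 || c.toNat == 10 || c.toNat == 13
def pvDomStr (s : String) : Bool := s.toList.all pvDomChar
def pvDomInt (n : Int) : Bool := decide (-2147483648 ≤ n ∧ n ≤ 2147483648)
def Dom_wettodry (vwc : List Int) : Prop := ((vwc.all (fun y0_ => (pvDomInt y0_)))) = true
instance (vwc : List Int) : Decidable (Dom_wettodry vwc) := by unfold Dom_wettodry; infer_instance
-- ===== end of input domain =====

-- B run-length encodes the answer (strict new-minimum records with counts) in one scan and then
-- expands the runs, instead of A's per-index append loop that re-reads w2d[idx-1] (objective: alternative).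

-- ===== PORT A =====
def wettodry (vwc : List Int) : List Int :=
  let v := vwc.map (fun i => if i < 0 then 0 else i)
  -- vwc[0]: IndexError on the empty list, excluded by Pre_wettodry
  let w2d0 : List Int := [PySem.List.pyGetD v 0 0]
  (PySem.List.pyRange 1 (v.length : Int) 1).foldl
    (fun w2d idx =>
      if PySem.List.pyGetD v idx 0 < PySem.List.pyGetD w2d (idx - 1) 0 then
        w2d ++ [PySem.List.pyGetD v idx 0]
      else
        w2d ++ [PySem.List.pyGetD w2d (idx - 1) 0]) w2d0

-- ===== PORT B =====
-- body of B's first loop: state = (runs, current min m, current run count cnt)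
def rleStep (acc : List (Int × Int) × Int × Int) (x : Int) : List (Int × Int) × Int × Int :=
  if x < acc.2.1 then (acc.1 ++ [(acc.2.1, acc.2.2)], x, 1)
  else (acc.1, acc.2.1, acc.2.2 + 1)

def wettodry_alt (vwc : List Int) : List Int :=
  match vwc with
  | [] => []  -- Source B reads v[0] here and raises IndexError; outside Pre_wettodry
  | _ :: _ =>
    let v := vwc.map (fun i => if i < 0 then 0 else i)
    let st := v.foldl rleStep ([], v.headD 0, 0)
    let runs := st.1 ++ [(st.2.1, st.2.2)]
    -- [val] * c : `.toNat` matches Python's list repetition (≤ 0 gives []); here c is always ≥ 0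
    runs.foldl (fun out r => out ++ List.replicate r.2.toNat r.1) []

-- ===== PRECONDITION & SPEC =====
-- A raises IndexError on the empty list (vwc[0]); B raises there too.
def Pre_wettodry (vwc : List Int) : Prop := vwc ≠ []
instance (vwc : List Int) : Decidable (Pre_wettodry vwc) := by unfold Pre_wettodry; infer_instance
def pvWitness_wettodry : List Int := [3, -1, 2]

def Spec_wettodry (vwc : List Int) (out : List Int) : Prop := out = wettodry_alt vwc
instance (vwc : List Int) (out : List Int) : Decidable (Spec_wettodry vwc out) := by unfold Spec_wettodry; infer_instance

-- ===== CLAIM (what is proved, stated in full; the proofs are below) =====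
def Claim_equal_wettodry : Prop := ∀ (vwc : List Int), Dom_wettodry vwc → Pre_wettodry vwc → Spec_wettodry vwc (wettodry vwc)

-- ===== LEMMAS AND PROOFS =====

-- running prefix-minimum of an (already clamped) list, starting from cur
def pmin (cur : Int) : List Int → List Int
  | [] => []
  | x :: xs => (if x < cur then x else cur) :: pmin (if x < cur then x else cur) xs

-- expansion of a run-length encoding
def expandRuns (rs : List (Int × Int)) : List Int :=
  rs.flatMap (fun r => List.replicate r.2.toNat r.1)

-- B's second loop is expandRuns
theorem expand_foldl (rs : List (Int × Int)) : ∀ (acc : List Int),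
    rs.foldl (fun out r => out ++ List.replicate r.2.toNat r.1) acc = acc ++ expandRuns rs := by
  induction rs with
  | nil => simp [expandRuns]
  | cons r rs ih => intro acc; simp [List.foldl_cons, ih, expandRuns]

-- B's first loop: the expanded runs (including the pending one) are the prefix minima
theorem rle_loop (t : List Int) : ∀ (rs : List (Int × Int)) (m c : Int), 0 ≤ c →
    expandRuns ((t.foldl rleStep (rs, m, c)).1 ++
        [((t.foldl rleStep (rs, m, c)).2.1, (t.foldl rleStep (rs, m, c)).2.2)])
      = expandRuns rs ++ List.replicate c.toNat m ++ pmin m t := by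
  induction t with
  | nil =>
    intro rs m c _
    simp [pmin, expandRuns]
  | cons x xs ih =>
    intro rs m c hc
    by_cases h : x < m
    · have hstep : rleStep (rs, m, c) x = (rs ++ [(m, c)], x, 1) := by
        simp [rleStep, h]
      simp only [List.foldl_cons, hstep]
      rw [ih (rs ++ [(m, c)]) x 1 (by omega)]
      simp [pmin, h, expandRuns]
    · have hstep : rleStep (rs, m, c) x = (rs, m, c + 1) := by
        simp [rleStep, h]
      simp only [List.foldl_cons, hstep]
      rw [ih rs m (c + 1) (by omega)]
      have : (c + 1).toNat = c.toNat + 1 := by omega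
      rw [this, List.replicate_succ']
      simp [pmin, h]

-- A's index loop, from position j with state w2d of length j whose last element is cur
theorem a_loop (v : List Int) : ∀ (t : List Int) (j : Nat) (w2d : List Int) (cur : Int),
    v.drop j = t → 0 < j → w2d.length = j →
    PySem.List.pyGetD w2d ((j : Int) - 1) 0 = cur →
    (PySem.List.pyRange (j : Int) (v.length : Int) 1).foldl
      (fun w2d idx =>
        if PySem.List.pyGetD v idx 0 < PySem.List.pyGetD w2d (idx - 1) 0 then
          w2d ++ [PySem.List.pyGetD v idx 0]
        else
          w2d ++ [PySem.List.pyGetD w2d (idx - 1) 0]) w2d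
    = w2d ++ pmin cur t := by
  intro t
  induction t with
  | nil =>
    intro j w2d cur hdrop hj hlen hlast
    have hle : v.length ≤ j := by
      by_contra h
      have := List.drop_eq_nil_iff.mp hdrop
      omega
    rw [PySem.List.pyRange_one_eq_nil (by omega)]
    simp [pmin]
  | cons x t ih =>
    intro j w2d cur hdrop hj hlen hlast
    have hjlt : j < v.length := by
      by_contra h
      rw [List.drop_eq_nil_iff.mpr (by omega)] at hdrop
      simp at hdrop
    have hx : v[j] = x := by
      have := List.getElem_cons_drop (as := v) (i := j) hjlt
      rw [hdrop] at this
      exact (List.cons_eq_cons.mp this.symm).1.symm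
    have hdrop' : v.drop (j + 1) = t := by
      have := List.getElem_cons_drop (as := v) (i := j) hjlt
      rw [hdrop] at this
      exact (List.cons_eq_cons.mp this.symm).2.symm
    rw [PySem.List.pyRange_one_cons (by exact_mod_cast hjlt)]
    rw [List.foldl_cons]
    have hvj : PySem.List.pyGetD v (j : Int) 0 = x := by
      rw [PySem.List.pyGetD_natCast, List.getD_eq_getElem?_getD, List.getElem?_eq_getElem hjlt]
      simpa using hx
    have hcast : ((j : Int) + 1) = ((j + 1 : Nat) : Int) := by push_cast; ring
    set c : Int := if x < cur then x else cur with hc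
    have hstep :
        (if PySem.List.pyGetD v (j : Int) 0 < PySem.List.pyGetD w2d ((j : Int) - 1) 0 then
          w2d ++ [PySem.List.pyGetD v (j : Int) 0]
        else
          w2d ++ [PySem.List.pyGetD w2d ((j : Int) - 1) 0]) = w2d ++ [c] := by
      rw [hvj, hlast, hc]
      split_ifs <;> rfl
    rw [hstep, hcast]
    have hlast' : PySem.List.pyGetD (w2d ++ [c]) (((j + 1 : Nat) : Int) - 1) 0 = c := by
      have : (((j + 1 : Nat) : Int) - 1) = ((j : Nat) : Int) := by push_cast; ring
      rw [this, PySem.List.pyGetD_natCast, List.getD_eq_getElem?_getD]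
      rw [List.getElem?_append_right (by omega)]
      simp [hlen]
    rw [ih (j + 1) (w2d ++ [c]) c hdrop' (by omega) (by simp [hlen]) hlast']
    simp [pmin, hc]

-- ===== VERDICT (by name: the statement is the Claim_ definition above) =====
theorem wettodry_spec : Claim_equal_wettodry := by
  intro vwc _ hpre
  unfold Spec_wettodry wettodry wettodry_alt
  match vwc with
  | [] => exact absurd rfl hpre
  | v0 :: rest =>
    simp only
    set clamp : Int → Int := fun i => if i < 0 then 0 else i with hclamp
    set c0 : Int := if v0 < 0 then 0 else v0 with hc0
    have hv : (v0 :: rest).map clamp = c0 :: rest.map clamp := by simp [hclamp, hc0]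
    rw [hv]
    -- A side: the index loop from position 1
    have hget0 : PySem.List.pyGetD (c0 :: rest.map clamp) 0 0 = c0 :=
      PySem.List.pyGetD_zero_cons _ _ _
    rw [hget0]
    have hA := a_loop (c0 :: rest.map clamp) (rest.map clamp) 1 [c0] c0 (by simp)
      (by omega) (by simp) (by norm_num [PySem.List.pyGetD_zero_cons])
    norm_num at hA
    rw [show ((c0 :: List.map clamp rest).length : Int) = ((rest.length : Int) + 1) by simp]
    rw [hA]
    -- B side: expand the run-length encoding
    rw [expand_foldl]
    simp only [List.headD_cons]
    have hB := rle_loop (c0 :: rest.map clamp) [] c0 0 (by omega)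
    rw [hB]
    simp [pmin, expandRuns]
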